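-- pv_equiv track=rewrite | github.com/ebering/figure-8-covers | find-figure-8-covers.py | self_osculates
-- ===== SOURCE A (Python) =====
-- def self_osculates(hyp, dictionary):
--     for edge_1 in hyp:
--         for edge_2 in hyp:  # for each pair of edges
--             if edge_1[0] == edge_2[0] and edge_1[1] != edge_2[1]:
--                 return True  # two edges with same origin, different labels
--             if edge_2[1] != edge_2[1] and dictionary[edge_1[1]] == dictionary[edge_2[1]]:
--                 return True  # two edges with different labels, same "endpoint"
--     return False
-- ===== SOURCE B (Python) =====
-- def self_osculates(hyp, dictionary):
--     seen = {}
--     for edge in hyp: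
--         origin, label = edge[0], edge[1]
--         if origin in seen and seen[origin] != label:
--             return True
--         seen[origin] = label
--     return False
-- ===== Notes on version B (the rewrite author's own statement) =====
-- stated objective: faster
-- what changed: Replaced the quadratic all-pairs scan with a single pass keeping a dict from origin to its label and reporting a conflicting reuse (the second condition in A is dead code since edge_2[1] != edge_2[1] is always false).
-- outside the precondition, e.g. on self_osculates([(1, 2), (1, 3), (0,)], {}): A returns True, B returns True
import Mathlib
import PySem

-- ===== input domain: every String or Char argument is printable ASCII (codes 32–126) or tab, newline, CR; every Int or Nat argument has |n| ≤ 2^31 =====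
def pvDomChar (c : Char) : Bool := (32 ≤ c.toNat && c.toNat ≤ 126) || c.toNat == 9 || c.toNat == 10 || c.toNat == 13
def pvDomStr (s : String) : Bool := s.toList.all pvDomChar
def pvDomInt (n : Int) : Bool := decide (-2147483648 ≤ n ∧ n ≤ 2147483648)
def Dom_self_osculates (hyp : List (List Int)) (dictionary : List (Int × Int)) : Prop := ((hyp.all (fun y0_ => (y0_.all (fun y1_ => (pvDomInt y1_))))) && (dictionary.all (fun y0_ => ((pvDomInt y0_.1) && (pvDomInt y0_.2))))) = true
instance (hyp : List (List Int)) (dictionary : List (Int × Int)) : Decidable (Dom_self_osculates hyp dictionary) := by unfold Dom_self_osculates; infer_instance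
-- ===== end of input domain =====

-- B replaces A's quadratic all-pairs scan by a single pass with a dict origin ↦ label,
-- returning True on the first conflicting reuse of an origin (faster: asymptotic, O(n^2) → O(n)).

-- ===== PORT A =====
-- edge[i]: Python indexing; under Pre_ (every edge has length ≥ 2) the index is in range,
-- so the .getD 0 default is never used and the port is exact there.
def pvIx (e : List Int) (i : Int) : Int := (PySem.List.pyGet? e i).getD 0

-- inner loop 'for edge_2 in hyp', with both if-branches in A's order (the second is A's
-- literal condition edge_2[1] != edge_2[1] && dictionary[edge_1[1]] == dictionary[edge_2[1]],
-- with dictionary[k] as Dict lookup on the association list)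
def pvInnerA (dictionary : List (Int × Int)) (e1 : List Int) : List (List Int) → Bool
  | [] => false
  | e2 :: rest =>
    if pvIx e1 0 == pvIx e2 0 && pvIx e1 1 != pvIx e2 1 then true
    else if pvIx e2 1 != pvIx e2 1 &&
            ((PySem.Dict.ofList dictionary).get? (pvIx e1 1) == (PySem.Dict.ofList dictionary).get? (pvIx e2 1)) then true
    else pvInnerA dictionary e1 rest

-- outer loop 'for edge_1 in hyp'
def pvOuterA (dictionary : List (Int × Int)) (hyp : List (List Int)) : List (List Int) → Bool
  | [] => false
  | e1 :: rest => if pvInnerA dictionary e1 hyp then true else pvOuterA dictionary hyp rest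

def self_osculates (hyp : List (List Int)) (dictionary : List (Int × Int)) : Bool :=
  pvOuterA dictionary hyp hyp

-- ===== PORT B =====
-- single pass with 'seen : dict origin ↦ label'
def pvGoB (seen : PySem.Dict Int Int) : List (List Int) → Bool
  | [] => false
  | e :: rest =>
    let origin := pvIx e 0
    let label := pvIx e 1
    if (match seen.get? origin with
        | some v => v != label
        | none => false) then true
    else pvGoB (seen.insert origin label) rest

def self_osculates_alt (hyp : List (List Int)) (dictionary : List (Int × Int)) : Bool :=
  pvGoB PySem.Dict.empty hyp

-- ===== PRECONDITION & SPEC =====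
-- Pre_ excludes hyp containing an edge of length < 2: indexing it raises IndexError in both
-- programs, except when an earlier pair already returned True before the short edge is reached
-- (there both A and B still return True, see cites).
def Pre_self_osculates (hyp : List (List Int)) (dictionary : List (Int × Int)) : Prop :=
  (hyp.all (fun e => 2 ≤ e.length)) = true
instance (hyp : List (List Int)) (dictionary : List (Int × Int)) : Decidable (Pre_self_osculates hyp dictionary) := by unfold Pre_self_osculates; infer_instance

def pvWitness_self_osculates : List (List Int) × (List (Int × Int)) := ([[1, 2], [1, 3]], [(2, 0)])

def Spec_self_osculates (hyp : List (List Int)) (dictionary : List (Int × Int)) (out : Bool) : Prop := out = self_osculates_alt hyp dictionary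
instance (hyp : List (List Int)) (dictionary : List (Int × Int)) (out : Bool) : Decidable (Spec_self_osculates hyp dictionary out) := by unfold Spec_self_osculates; infer_instance

-- ===== CLAIM (what is proved, stated in full; the proofs are below) =====
def Claim_equal_self_osculates : Prop := ∀ (hyp : List (List Int)) (dictionary : List (Int × Int)), Dom_self_osculates hyp dictionary → Pre_self_osculates hyp dictionary → Spec_self_osculates hyp dictionary (self_osculates hyp dictionary)

-- ===== LEMMAS AND PROOFS =====

-- the conflict relation both programs detect
def pvConf (e1 e2 : List Int) : Bool := pvIx e1 0 == pvIx e2 0 && pvIx e1 1 != pvIx e2 1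

-- A's second branch is dead: edge_2[1] != edge_2[1] is false
lemma innerA_eq_any (d : List (Int × Int)) (e1 : List Int) (l : List (List Int)) :
    pvInnerA d e1 l = l.any (fun e2 => pvConf e1 e2) := by
  induction l with
  | nil => rfl
  | cons e2 rest ih =>
      simp only [pvInnerA, List.any_cons, pvConf]
      by_cases h : (pvIx e1 0 == pvIx e2 0 && pvIx e1 1 != pvIx e2 1) = true
      · simp [h]
      · simp only [Bool.not_eq_true] at h
        simp [h, ih, pvConf]

lemma outerA_eq_any (d : List (Int × Int)) (hyp l : List (List Int)) :
    pvOuterA d hyp l = l.any (fun e1 => pvInnerA d e1 hyp) := by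
  induction l with
  | nil => rfl
  | cons e1 rest ih =>
      simp only [pvOuterA, List.any_cons]
      by_cases h : pvInnerA d e1 hyp = true <;> simp [h, ih]

-- A = "some (unordered) pair of edges conflicts"
lemma portA_iff (hyp : List (List Int)) (d : List (Int × Int)) :
    self_osculates hyp d = true ↔ ∃ e1 ∈ hyp, ∃ e2 ∈ hyp, pvConf e1 e2 = true := by
  simp [self_osculates, outerA_eq_any, innerA_eq_any]

-- the invariant relating B's dict to the list of already-processed edges
def pvGood (p : List (List Int)) (seen : PySem.Dict Int Int) : Prop :=
  ∀ o v, seen.get? o = some v ↔ ∃ e ∈ p, pvIx e 0 = o ∧ pvIx e 1 = v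

lemma good_no_conf {p : List (List Int)} {seen : PySem.Dict Int Int} (hg : pvGood p seen) :
    ¬ ∃ e1 ∈ p, ∃ e2 ∈ p, pvConf e1 e2 = true := by
  rintro ⟨e1, h1, e2, h2, hc⟩
  simp only [pvConf, Bool.and_eq_true, beq_iff_eq, bne_iff_ne] at hc
  obtain ⟨hk, hl⟩ := hc
  have a1 : seen.get? (pvIx e1 0) = some (pvIx e1 1) := (hg _ _).2 ⟨e1, h1, rfl, rfl⟩
  have a2 : seen.get? (pvIx e2 0) = some (pvIx e2 1) := (hg _ _).2 ⟨e2, h2, rfl, rfl⟩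
  rw [hk] at a1; rw [a1] at a2
  exact hl (Option.some_injective _ a2)

lemma good_insert {p : List (List Int)} {seen : PySem.Dict Int Int} (hg : pvGood p seen)
    (e : List Int) (hno : ∀ v, seen.get? (pvIx e 0) = some v → v = pvIx e 1) :
    pvGood (p ++ [e]) (seen.insert (pvIx e 0) (pvIx e 1)) := by
  intro o v
  rw [PySem.Dict.get?_insert]
  constructor
  · intro h
    by_cases ho : o = pvIx e 0
    · rw [if_pos ho] at h
      exact ⟨e, by simp, ho.symm, Option.some_injective _ h⟩
    · rw [if_neg ho] at h
      obtain ⟨e', he', hk, hv⟩ := (hg o v).1 h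
      exact ⟨e', by simp [he'], hk, hv⟩
  · rintro ⟨e', he', hk, hv⟩
    rcases List.mem_append.1 he' with he' | he'
    · by_cases ho : o = pvIx e 0
      · rw [if_pos ho]
        have : seen.get? (pvIx e 0) = some v := by
          rw [← ho, ← hk, ← hv]; exact (hg _ _).2 ⟨e', he', rfl, rfl⟩
        rw [hno v this]
      · rw [if_neg ho]
        exact (hg o v).2 ⟨e', he', hk, hv⟩
    · simp only [List.mem_singleton] at he'
      subst he'
      rw [if_pos hk.symm, hv]

-- B's loop, generalized over the processed prefix
lemma goB_iff (l : List (List Int)) : ∀ (p : List (List Int)) (seen : PySem.Dict Int Int),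
    pvGood p seen →
    (pvGoB seen l = true ↔ ∃ e1 ∈ p ++ l, ∃ e2 ∈ p ++ l, pvConf e1 e2 = true) := by
  induction l with
  | nil =>
      intro p seen hg
      simp only [pvGoB, List.append_nil]
      constructor
      · intro h; cases h
      · intro h; exact absurd h (good_no_conf hg)
  | cons e rest ih =>
      intro p seen hg
      simp only [pvGoB]
      by_cases hb : (match seen.get? (pvIx e 0) with
                     | some v => v != pvIx e 1
                     | none => false) = true
      · rw [if_pos hb]
        simp only [true_iff]
        rcases h : seen.get? (pvIx e 0) with _ | v
        · rw [h] at hb; cases hb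
        · rw [h] at hb
          obtain ⟨e', he', hk, hv⟩ := (hg _ _).1 h
          refine ⟨e', by simp [he'], e, by simp, ?_⟩
          simp only [pvConf, Bool.and_eq_true, beq_iff_eq, bne_iff_ne]
          exact ⟨hk, by rw [hv]; exact bne_iff_ne.1 hb⟩
      · rw [if_neg hb]
        have hno : ∀ v, seen.get? (pvIx e 0) = some v → v = pvIx e 1 := by
          intro v hv
          rw [hv] at hb
          by_contra hne
          exact hb (bne_iff_ne.2 hne)
        rw [ih (p ++ [e]) _ (good_insert hg e hno)]
        simp [List.append_assoc]

lemma good_empty : pvGood [] PySem.Dict.empty := by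
  intro o v
  simp [PySem.Dict.get?_empty]

lemma portB_iff (hyp : List (List Int)) (d : List (Int × Int)) :
    self_osculates_alt hyp d = true ↔ ∃ e1 ∈ hyp, ∃ e2 ∈ hyp, pvConf e1 e2 = true := by
  have := goB_iff hyp [] PySem.Dict.empty good_empty
  simpa [self_osculates_alt] using this

-- ===== VERDICT (by name: the statement is the Claim_ definition above) =====
theorem self_osculates_spec : Claim_equal_self_osculates := by
  intro hyp dictionary _ _
  unfold Spec_self_osculates
  rcases h : self_osculates_alt hyp dictionary with _ | _
  · rw [← Bool.not_eq_true] at h ⊢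
    intro hc
    exact h ((portB_iff hyp dictionary).2 ((portA_iff hyp dictionary).1 hc))
  · exact (portA_iff hyp dictionary).2 ((portB_iff hyp dictionary).1 h)
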